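-- pv_equiv track=rewrite | github.com/hhcorzo/Python | geometry_results_extraction.py | numberOfBasisSets
-- ===== SOURCE A (Python) =====
-- def numberOfBasisSets(logarray):
--     '''returns a list of the split log arrays by basis set. length is number of basis sets'''
--     commandLocation=[]
--     logsToReturn=[]
--     x=0
--     while x < len(logarray):
--         if logarray[x] =='Final':
--             commandLocation.append(x)
--         x+=1
--     commandLocation.append(len(logarray))
--     x=0
--     logsToReturn.append(logarray[:commandLocation[0]])
--     #the first log in the array is from the start of the file to the first keyword
--     while x< len(commandLocation)-1:
--         b=logarray[commandLocation[x]:commandLocation[x+1]]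
--         logsToReturn.append(b)
--         x+=1
--     return logsToReturn
-- ===== SOURCE B (Python) =====
-- def numberOfBasisSets(logarray):
--     '''returns a list of the split log arrays by basis set. length is number of basis sets'''
--     result = []
--     start = 0
--     for i, item in enumerate(logarray):
--         if item == 'Final':
--             result.append(logarray[start:i])
--             start = i
--     result.append(logarray[start:])
--     return result
-- ===== Notes on version B (the rewrite author's own statement) =====
-- stated objective: simpler
-- what changed: Replaces A's two-phase scheme (first collect all 'Final' indices plus a sentinel, then a second indexed loop slicing between consecutive entries of that table) by one enumerate pass that keeps a running start index and appends each slice as soon as the next marker is seen, with a final slice after the loop.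
import Mathlib
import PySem

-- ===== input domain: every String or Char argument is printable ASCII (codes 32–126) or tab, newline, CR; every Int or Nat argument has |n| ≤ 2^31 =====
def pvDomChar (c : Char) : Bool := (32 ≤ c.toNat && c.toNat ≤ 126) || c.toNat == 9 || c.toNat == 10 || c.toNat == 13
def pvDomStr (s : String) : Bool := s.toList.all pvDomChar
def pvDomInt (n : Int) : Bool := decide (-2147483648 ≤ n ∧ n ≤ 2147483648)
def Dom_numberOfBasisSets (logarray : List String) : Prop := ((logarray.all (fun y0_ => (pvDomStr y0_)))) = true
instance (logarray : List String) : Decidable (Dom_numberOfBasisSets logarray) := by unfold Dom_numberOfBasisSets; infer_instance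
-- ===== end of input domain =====

-- B replaces A's two-phase index-table-then-slice scheme with a single enumerate pass
-- keeping a running start index (objective: simpler).

-- ===== PORT A =====
-- A's first while loop: collect indices x with logarray[x] == 'Final'
def pvA_findLoop (logarray : List String) (x : Nat) (commandLocation : List Nat) : List Nat :=
  if x < logarray.length then
    pvA_findLoop logarray (x + 1)
      (if PySem.List.pyGetD logarray (x : Int) "" = "Final" then commandLocation ++ [x] else commandLocation)
  else commandLocation
termination_by logarray.length - x

-- A's second while loop: slice between consecutive entries of commandLocation
def pvA_sliceLoop (logarray : List String) (cl : List Nat) (x : Nat) (acc : List (List String)) : List (List String) :=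
  if x < cl.length - 1 then
    pvA_sliceLoop logarray cl (x + 1)
      (acc ++ [PySem.List.slice logarray (some (cl.getD x 0 : Int)) (some (cl.getD (x + 1) 0 : Int))])
  else acc
termination_by cl.length - 1 - x

def numberOfBasisSets (logarray : List String) : List (List String) :=
  let commandLocation := pvA_findLoop logarray 0 [] ++ [logarray.length]
  let logsToReturn := [PySem.List.slice logarray none (some (commandLocation.getD 0 0 : Int))]
  pvA_sliceLoop logarray commandLocation 0 logsToReturn

-- ===== PORT B =====
def numberOfBasisSets_alt (logarray : List String) : List (List String) :=
  let r := (PySem.List.enumerate logarray 0).foldl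
    (fun (p : Int × List (List String)) (ie : Int × String) =>
      if ie.2 = "Final" then (ie.1, p.2 ++ [PySem.List.slice logarray (some p.1) (some ie.1)]) else p)
    ((0 : Int), ([] : List (List String)))
  r.2 ++ [PySem.List.slice logarray (some r.1) none]

-- ===== PRECONDITION & SPEC =====
def Spec_numberOfBasisSets (logarray : List String) (out : List (List String)) : Prop := out = numberOfBasisSets_alt logarray
instance (logarray : List String) (out : List (List String)) : Decidable (Spec_numberOfBasisSets logarray out) := by unfold Spec_numberOfBasisSets; infer_instance

-- ===== CLAIM (what is proved, stated in full; the proofs are below) =====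
def Claim_equal_numberOfBasisSets : Prop := ∀ (logarray : List String), Dom_numberOfBasisSets logarray → Spec_numberOfBasisSets logarray (numberOfBasisSets logarray)

-- ===== LEMMAS AND PROOFS =====

-- positions (offset by `off`) of "Final" in a list
def finalsFrom (off : Nat) : List String → List Nat
  | [] => []
  | a :: l => (if a = "Final" then [off] else []) ++ finalsFrom (off + 1) l

-- the intended segmentation: segment from `start` to each marker, then the rest
def segs (log : List String) : Nat → List Nat → List (List String)
  | start, [] => [log.drop start]
  | start, m :: ms => (log.drop start).take (m - start) :: segs log m ms

-- slices between consecutive entries of a marker table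
def pairsSegs (log : List String) : List Nat → List (List String)
  | [] => []
  | [_] => []
  | c1 :: c2 :: t => (log.drop c1).take (c2 - c1) :: pairsSegs log (c2 :: t)

theorem findLoop_eq (log : List String) : ∀ (l : List String) (x : Nat) (acc : List Nat),
    log.drop x = l → pvA_findLoop log x acc = acc ++ finalsFrom x l := by
  intro l
  induction l with
  | nil =>
    intro x acc h
    have hx : ¬ x < log.length := by
      have := congrArg List.length h
      simp [List.length_drop] at this
      omega
    rw [pvA_findLoop]
    simp [hx, finalsFrom]
  | cons a l ih =>
    intro x acc h
    have hlen : x < log.length := by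
      have := congrArg List.length h
      simp [List.length_drop] at this
      omega
    have hget : log.getD x "" = a := by
      have h0 : (log.drop x).getD 0 "" = a := by rw [h]; rfl
      rw [List.getD_eq_getElem?_getD] at h0 ⊢
      rwa [List.getElem?_drop, Nat.add_zero] at h0
    have hdrop : log.drop (x + 1) = l := by
      have : (log.drop x).drop 1 = l := by rw [h]; rfl
      rw [List.drop_drop] at this
      simpa [Nat.add_comm] using this
    rw [pvA_findLoop]
    simp only [hlen, if_pos, PySem.List.pyGetD_natCast, hget]
    rw [ih (x + 1) _ hdrop]
    by_cases hfin : a = "Final" <;> simp [hfin, finalsFrom]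

theorem sliceLoop_eq (log : List String) : ∀ (n : Nat) (cl : List Nat) (x : Nat) (acc : List (List String)),
    cl.length - 1 - x = n → pvA_sliceLoop log cl x acc = acc ++ pairsSegs log (cl.drop x) := by
  intro n
  induction n with
  | zero =>
    intro cl x acc h
    have hx : ¬ x < cl.length - 1 := by omega
    rw [pvA_sliceLoop]
    simp only [hx, if_neg, not_false_iff]
    have : pairsSegs log (cl.drop x) = [] := by
      have hl : (cl.drop x).length ≤ 1 := by simp [List.length_drop]; omega
      match hm : cl.drop x with
      | [] => simp [pairsSegs]
      | [_] => simp [pairsSegs]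
      | c1 :: c2 :: t => rw [hm] at hl; simp at hl
    simp [this]
  | succ n ih =>
    intro cl x acc h
    have hx : x < cl.length - 1 := by omega
    have hlt : x + 1 < cl.length := by omega
    obtain ⟨c1, t1, h1⟩ : ∃ c1 t1, cl.drop x = c1 :: t1 := by
      have : cl.drop x ≠ [] := by
        intro hnil
        have := congrArg List.length hnil
        simp [List.length_drop] at this
        omega
      exact List.exists_cons_of_ne_nil this
    obtain ⟨c2, t2, h2⟩ : ∃ c2 t2, cl.drop (x + 1) = c2 :: t2 := by
      have : cl.drop (x + 1) ≠ [] := by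
        intro hnil
        have := congrArg List.length hnil
        simp [List.length_drop] at this
        omega
      exact List.exists_cons_of_ne_nil this
    have ht1 : t1 = c2 :: t2 := by
      have : (cl.drop x).drop 1 = cl.drop (x + 1) := by rw [List.drop_drop, Nat.add_comm]
      rw [h1, h2] at this
      simpa using this
    have hg1 : cl.getD x 0 = c1 := by
      rw [List.getD_eq_getElem?_getD]
      have : cl[x]? = (cl.drop x)[0]? := by rw [List.getElem?_drop, Nat.add_zero]
      rw [this, h1]; rfl
    have hg2 : cl.getD (x + 1) 0 = c2 := by
      rw [List.getD_eq_getElem?_getD]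
      have : cl[x + 1]? = (cl.drop (x + 1))[0]? := by rw [List.getElem?_drop, Nat.add_zero]
      rw [this, h2]; rfl
    rw [pvA_sliceLoop]
    simp only [hx, if_pos]
    rw [ih cl (x + 1) _ (by omega)]
    rw [h1, h2, ht1, hg1, hg2]
    simp [pairsSegs, PySem.List.slice_natCast]

theorem foldB_eq (log : List String) : ∀ (l : List String) (off start : Nat) (acc : List (List String)),
    (let r := (PySem.List.enumerate l (off : Int)).foldl
        (fun (p : Int × List (List String)) (ie : Int × String) =>
          if ie.2 = "Final" then (ie.1, p.2 ++ [PySem.List.slice log (some p.1) (some ie.1)]) else p)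
        ((start : Int), acc);
     r.2 ++ [PySem.List.slice log (some r.1) none])
    = acc ++ segs log start (finalsFrom off l) := by
  intro l
  induction l with
  | nil =>
    intro off start acc
    simp [PySem.List.enumerate_nil, segs, finalsFrom, PySem.List.slice_from_natCast]
  | cons a l ih =>
    intro off start acc
    rw [PySem.List.enumerate_cons]
    by_cases hfin : a = "Final"
    · simp only [hfin, List.foldl_cons, if_pos]
      have : ((off : Int) + 1) = ((off + 1 : Nat) : Int) := by push_cast; ring
      rw [this]
      rw [ih (off + 1) off (acc ++ [PySem.List.slice log (some (start : Int)) (some (off : Int))])]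
      simp [finalsFrom, segs, PySem.List.slice_natCast]
    · simp only [List.foldl_cons, hfin, if_neg, not_false_iff]
      have : ((off : Int) + 1) = ((off + 1 : Nat) : Int) := by push_cast; ring
      rw [this]
      rw [ih (off + 1) start acc]
      simp [finalsFrom, hfin]

theorem segs_eq_pairs (log : List String) (n : Nat) (hn : log.length ≤ n) :
    ∀ (ms : List Nat) (start : Nat), segs log start ms = pairsSegs log (start :: (ms ++ [n])) := by
  intro ms
  induction ms with
  | nil =>
    intro start
    simp only [segs, List.nil_append, pairsSegs]
    have : (log.drop start).take (n - start) = log.drop start := by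
      apply List.take_of_length_le
      simp [List.length_drop]
      omega
    rw [this]
  | cons m rest ih =>
    intro start
    simp only [segs, List.cons_append, pairsSegs]
    rw [ih m]

-- ===== VERDICT (by name: the statement is the Claim_ definition above) =====
theorem numberOfBasisSets_spec : Claim_equal_numberOfBasisSets := by
  intro log _
  unfold Spec_numberOfBasisSets
  simp only [numberOfBasisSets, numberOfBasisSets_alt]
  have hB := foldB_eq log log 0 0 []
  simp only [List.nil_append, Nat.cast_zero] at hB
  rw [hB]
  have hA := findLoop_eq log log 0 [] (by simp)
  simp only [List.nil_append] at hA
  rw [hA]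
  set fs := finalsFrom 0 log with hfs
  have hslice := sliceLoop_eq log ((fs ++ [log.length]).length - 1 - 0) (fs ++ [log.length]) 0
    [PySem.List.slice log none (some ((fs ++ [log.length]).getD 0 0 : Int))] rfl
  rw [hslice, List.drop_zero]
  rw [segs_eq_pairs log log.length (le_refl _) fs 0]
  cases fs with
  | nil =>
    simp [pairsSegs, PySem.List.slice_to_natCast, List.getD]
  | cons c cs =>
    simp [pairsSegs, PySem.List.slice_to_natCast, List.getD]
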